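-- pv_equiv track=rewrite | github.com/IvanovskyOrtega/project-euler-solutions | solutions/011_largest_product_in_a_grid.py | find_greatest_product_in_cols
-- ===== SOURCE A (Python) =====
-- from typing import List
--
-- def find_greatest_product_in_cols(grid: List[List[int]], n: int) -> int:
--     """find_greatest_product_in_cols.
--
--     Find the greatest product of `n` consecutive numbers in the columns of a
--     given grid.
--
--     Arguments
--     ----------
--     grid : List[List[int]]
--         The grid of numbers.
--     n : int
--         The amount of consecutive numbers to find its product.
--
--     Returns
--     -------
--     int : The maximum product for the grid rows.
--
--     Examples
--     --------
--     >>> find_greatest_product_in_rows([[1,2], [2,3]],2,)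
--     6
--     """
--     grid_size = len(grid)
--
--     if n > grid_size:
--         return -1
--
--     max_prod = 0
--     j = 0
--     while j < grid_size:
--         numbers = [grid[x][j] for x in range(0, n)]
--         i = n - 1
--         while True:
--             currrent_prod = 1
--             for num in numbers:
--                 if num == 0:
--                     currrent_prod = 0
--                     break
--                 currrent_prod *= num
--             max_prod = max(max_prod, currrent_prod)
--             i += 1
--             if i >= grid_size:
--                 break
--             numbers.pop(0)
--             numbers.append(grid[i][j])
--         j += 1
--     return max_prod
-- ===== SOURCE B (Python) =====
-- from typing import List
--
-- def find_greatest_product_in_cols(grid: List[List[int]], n: int) -> int: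
--     """Sliding-window variant: keep a running product of the window's nonzero
--     entries and a zero counter; divide out the element that leaves the window
--     and multiply in the one that enters."""
--     size = len(grid)
--     if n > size:
--         return -1
--     best = 0
--     for j in range(size):
--         prod = 1
--         zeros = 0
--         for x in range(n):
--             v = grid[x][j]
--             if v == 0:
--                 zeros += 1
--             else:
--                 prod *= v
--         best = max(best, prod if zeros == 0 else 0)
--         for i in range(n, size):
--             u = grid[i - n][j]
--             if u == 0:
--                 zeros -= 1
--             else:
--                 prod //= u
--             v = grid[i][j]
--             if v == 0:
--                 zeros += 1
--             else:
--                 prod *= v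
--             best = max(best, prod if zeros == 0 else 0)
--     return best
-- ===== Notes on version B (the rewrite author's own statement) =====
-- stated objective: alternative
-- what changed: Replaced A's per-window re-multiplication over a popped/appended n-element list by a sliding window that keeps a running product of the window's nonzero entries plus a zero counter, dividing out the leaving element and multiplying in the entering one.
import Mathlib
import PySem

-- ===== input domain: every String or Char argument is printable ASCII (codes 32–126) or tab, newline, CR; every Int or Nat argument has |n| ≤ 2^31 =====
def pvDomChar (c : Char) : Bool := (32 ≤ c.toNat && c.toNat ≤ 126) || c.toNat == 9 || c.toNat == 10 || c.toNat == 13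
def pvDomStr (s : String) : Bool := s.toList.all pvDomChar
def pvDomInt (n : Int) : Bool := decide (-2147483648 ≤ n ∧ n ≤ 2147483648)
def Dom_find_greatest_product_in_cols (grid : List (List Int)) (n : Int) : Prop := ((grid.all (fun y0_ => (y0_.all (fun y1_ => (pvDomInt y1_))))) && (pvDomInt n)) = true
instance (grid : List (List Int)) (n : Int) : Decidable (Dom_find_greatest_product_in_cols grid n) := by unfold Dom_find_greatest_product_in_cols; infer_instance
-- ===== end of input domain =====

-- B re-implements A's per-column window scan as a sliding window: a running product of
-- the window's nonzero entries plus a zero counter, dividing out the element that leaves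
-- the window and multiplying in the one that enters (objective: alternative algorithm).

-- ===== PORT A =====
-- grid[i][j] (always in range under Pre_; the default is never used there)
def pvGet (grid : List (List Int)) (i j : Int) : Int :=
  (PySem.List.pyGet? ((PySem.List.pyGet? grid i).getD []) j).getD 0

-- the 'for num in numbers: if num == 0: … break' product loop
def pvA_prodLoop : List Int → Int → Int
  | [], acc => acc
  | num :: rest, acc => if num = 0 then 0 else pvA_prodLoop rest (acc * num)

-- the inner 'while True' loop; fuel = number of remaining slide steps (exact under Pre_)
def pvA_inner (grid : List (List Int)) (gs j : Int) : Nat → List Int → Int → Int → Int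
  | fuel, numbers, i, maxp =>
    let p := pvA_prodLoop numbers 1
    let maxp' := max maxp p
    let i' := i + 1
    if i' ≥ gs then maxp'
    else match fuel with
      | 0 => maxp'
      | fuel' + 1 => pvA_inner grid gs j fuel' (numbers.tail ++ [pvGet grid i' j]) i' maxp'

def find_greatest_product_in_cols (grid : List (List Int)) (n : Int) : Int :=
  let gs : Int := grid.length
  if n > gs then -1
  else
    (PySem.List.pyRange 0 gs 1).foldl
      (fun maxp j =>
        let numbers := (PySem.List.pyRange 0 n 1).map (fun x => pvGet grid x j)
        pvA_inner grid gs j (gs - n).toNat numbers (n - 1) maxp) 0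

-- ===== PORT B =====
def find_greatest_product_in_cols_alt (grid : List (List Int)) (n : Int) : Int :=
  let size : Int := grid.length
  if n > size then -1
  else
    (PySem.List.pyRange 0 size 1).foldl
      (fun best j =>
        let init := (PySem.List.pyRange 0 n 1).foldl
          (fun (pz : Int × Int) x =>
            let v := pvGet grid x j
            if v = 0 then (pz.1, pz.2 + 1) else (pz.1 * v, pz.2)) (1, 0)
        let best1 := max best (if init.2 = 0 then init.1 else 0)
        ((PySem.List.pyRange n size 1).foldl
          (fun (st : Int × Int × Int) i =>
            let u := pvGet grid (i - n) j
            let st1 := if u = 0 then (st.1, st.2.1 - 1, st.2.2)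
                       else (PySem.Int.floordiv st.1 u, st.2.1, st.2.2)
            let v := pvGet grid i j
            let st2 := if v = 0 then (st1.1, st1.2.1 + 1, st1.2.2)
                       else (st1.1 * v, st1.2.1, st1.2.2)
            (st2.1, st2.2.1, max st2.2.2 (if st2.2.1 = 0 then st2.1 else 0)))
          (init.1, init.2, best1)).2.2) 0

-- ===== PRECONDITION & SPEC =====
-- Pre_ excludes exactly the inputs where Python A raises: n ≤ 0 with a nonempty grid
-- (pop from an empty window, IndexError) and, when 1 ≤ n ≤ len(grid), a row shorter
-- than len(grid) (grid[x][j] IndexError).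
def Pre_find_greatest_product_in_cols (grid : List (List Int)) (n : Int) : Prop :=
  n > grid.length ∨ grid = [] ∨ (1 ≤ n ∧ ∀ row ∈ grid, (grid.length : Int) ≤ row.length)
instance (grid : List (List Int)) (n : Int) : Decidable (Pre_find_greatest_product_in_cols grid n) := by unfold Pre_find_greatest_product_in_cols; infer_instance

def pvWitness_find_greatest_product_in_cols : List (List Int) × Int := ([[1, 2], [2, 3]], 2)

def Spec_find_greatest_product_in_cols (grid : List (List Int)) (n : Int) (out : Int) : Prop := out = find_greatest_product_in_cols_alt grid n
instance (grid : List (List Int)) (n : Int) (out : Int) : Decidable (Spec_find_greatest_product_in_cols grid n out) := by unfold Spec_find_greatest_product_in_cols; infer_instance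

-- ===== CLAIM (what is proved, stated in full; the proofs are below) =====
def Claim_equal_find_greatest_product_in_cols : Prop := ∀ (grid : List (List Int)) (n : Int), Dom_find_greatest_product_in_cols grid n → Pre_find_greatest_product_in_cols grid n → Spec_find_greatest_product_in_cols grid n (find_greatest_product_in_cols grid n)

-- ===== LEMMAS AND PROOFS =====

-- product of the nonzero entries of a window
def pvProdNZ : List Int → Int
  | [] => 1
  | x :: xs => (if x = 0 then 1 else x) * pvProdNZ xs

-- number of zero entries of a window
def pvCntZ : List Int → Int
  | [] => 0
  | x :: xs => (if x = 0 then 1 else 0) + pvCntZ xs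

lemma pvProdNZ_append_singleton (xs : List Int) (v : Int) :
    pvProdNZ (xs ++ [v]) = pvProdNZ xs * (if v = 0 then 1 else v) := by
  induction xs with
  | nil => simp only [List.nil_append, pvProdNZ]; ring
  | cons x xs ih => simp only [List.cons_append, pvProdNZ, ih]; ring

lemma pvCntZ_append_singleton (xs : List Int) (v : Int) :
    pvCntZ (xs ++ [v]) = pvCntZ xs + (if v = 0 then 1 else 0) := by
  induction xs with
  | nil => simp only [List.nil_append, pvCntZ]; ring
  | cons x xs ih => simp only [List.cons_append, pvCntZ, ih]; ring

lemma pvCntZ_nonneg (w : List Int) : 0 ≤ pvCntZ w := by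
  induction w with
  | nil => simp [pvCntZ]
  | cons x xs ih => simp only [pvCntZ]; split <;> omega

-- A's break-on-zero product in terms of (pvProdNZ, pvCntZ)
lemma pvA_prodLoop_eq (w : List Int) : ∀ acc : Int,
    pvA_prodLoop w acc = if pvCntZ w = 0 then acc * pvProdNZ w else 0 := by
  induction w with
  | nil => intro acc; simp [pvA_prodLoop, pvProdNZ, pvCntZ]
  | cons x xs ih =>
    intro acc
    rw [pvA_prodLoop]
    by_cases hx : x = 0
    · subst hx
      have h0 : pvCntZ ((0 : Int) :: xs) ≠ 0 := by
        have := pvCntZ_nonneg xs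
        simp [pvCntZ]
        omega
      rw [if_pos rfl, if_neg h0]
    · rw [if_neg hx, ih]
      have hc : pvCntZ (x :: xs) = pvCntZ xs := by simp [pvCntZ, hx]
      rw [hc]
      by_cases h : pvCntZ xs = 0
      · rw [if_pos h, if_pos h]
        simp only [pvProdNZ, if_neg hx]
        ring
      · rw [if_neg h, if_neg h]

-- B's warm-up fold accumulates (product of nonzeros, count of zeros)
lemma pvB_init_fold (grid : List (List Int)) (j : Int) : ∀ (l : List Int) (p z : Int),
    l.foldl (fun (pz : Int × Int) x =>
        let v := pvGet grid x j
        if v = 0 then (pz.1, pz.2 + 1) else (pz.1 * v, pz.2)) (p, z)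
      = (p * pvProdNZ (l.map (fun x => pvGet grid x j)),
         z + pvCntZ (l.map (fun x => pvGet grid x j))) := by
  intro l
  induction l with
  | nil => intro p z; simp [pvProdNZ, pvCntZ]
  | cons x xs ih =>
    intro p z
    by_cases hv : pvGet grid x j = 0 <;>
      simp [hv, ih, pvProdNZ, pvCntZ, Prod.ext_iff] <;> ring

-- the window ending at row i of column j
def pvWin (grid : List (List Int)) (j n i : Int) : List Int :=
  (List.range n.toNat).map (fun k : Nat => pvGet grid (i - (n - 1) + (k : Int)) j)

lemma pvWin_cons (grid : List (List Int)) (j n i : Int) (hn : 1 ≤ n) :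
    pvWin grid j n i
      = pvGet grid (i + 1 - n) j
        :: (List.range (n.toNat - 1)).map (fun k : Nat => pvGet grid (i + 1 - (n - 1) + (k : Int)) j) := by
  obtain ⟨m, hm⟩ : ∃ m, n.toNat = m + 1 := ⟨n.toNat - 1, by omega⟩
  rw [pvWin, hm, Nat.add_sub_cancel, List.range_succ_eq_map, List.map_cons, List.map_map]
  congr 1
  · congr 1
    push_cast
    omega
  · apply List.map_congr_left
    intro k _
    simp only [Function.comp_apply]
    congr 1
    push_cast
    omega

lemma pvWin_slide (grid : List (List Int)) (j n i : Int) (hn : 1 ≤ n) :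
    (List.range (n.toNat - 1)).map (fun k : Nat => pvGet grid (i + 1 - (n - 1) + (k : Int)) j)
        ++ [pvGet grid (i + 1) j]
      = pvWin grid j n (i + 1) := by
  obtain ⟨m, hm⟩ : ∃ m, n.toNat = m + 1 := ⟨n.toNat - 1, by omega⟩
  rw [pvWin, hm, Nat.add_sub_cancel, List.range_succ, List.map_append, List.map_cons, List.map_nil]
  have h : i + 1 - (n - 1) + (m : Int) = i + 1 := by omega
  rw [h]

lemma pvWin_first (grid : List (List Int)) (j n : Int) (hn : 0 ≤ n) :
    (PySem.List.pyRange 0 n 1).map (fun x => pvGet grid x j) = pvWin grid j n (n - 1) := by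
  rw [PySem.List.pyRange_one, List.map_map, pvWin]
  have : (n - 0).toNat = n.toNat := by omega
  rw [this]
  apply List.map_congr_left
  intro k _
  simp only [Function.comp_apply]
  congr 1
  omega

-- the per-column core lemma: A's slide loop equals B's slide fold
lemma pv_main (grid : List (List Int)) (n j : Int) (hn : 1 ≤ n) :
    ∀ (fuel : Nat) (i m : Int), i < (grid.length : Int) →
      fuel = ((grid.length : Int) - 1 - i).toNat →
      pvA_inner grid grid.length j fuel (pvWin grid j n i) i m
        = ((PySem.List.pyRange (i + 1) grid.length 1).foldl
            (fun (st : Int × Int × Int) i' =>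
              let u := pvGet grid (i' - n) j
              let st1 := if u = 0 then (st.1, st.2.1 - 1, st.2.2)
                         else (PySem.Int.floordiv st.1 u, st.2.1, st.2.2)
              let v := pvGet grid i' j
              let st2 := if v = 0 then (st1.1, st1.2.1 + 1, st1.2.2)
                         else (st1.1 * v, st1.2.1, st1.2.2)
              (st2.1, st2.2.1, max st2.2.2 (if st2.2.1 = 0 then st2.1 else 0)))
            (pvProdNZ (pvWin grid j n i), pvCntZ (pvWin grid j n i),
             max m (if pvCntZ (pvWin grid j n i) = 0 then pvProdNZ (pvWin grid j n i) else 0))).2.2 := by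
  intro fuel
  induction fuel with
  | zero =>
    intro i m hi hf
    have hend : i + 1 ≥ (grid.length : Int) := by omega
    have hr : PySem.List.pyRange (i + 1) grid.length 1 = [] := by
      rw [PySem.List.pyRange_one]
      have h0 : ((grid.length : Int) - (i + 1)).toNat = 0 := by omega
      rw [h0, List.range_zero, List.map_nil]
    rw [pvA_inner, hr]
    simp only [List.foldl_nil, if_pos hend]
    rw [pvA_prodLoop_eq]
    simp only [one_mul]
  | succ fuel ih =>
    intro i m hi hf
    by_cases hend : i + 1 ≥ (grid.length : Int)
    · have hr : PySem.List.pyRange (i + 1) grid.length 1 = [] := by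
        rw [PySem.List.pyRange_one]
        have h0 : ((grid.length : Int) - (i + 1)).toNat = 0 := by omega
        rw [h0, List.range_zero, List.map_nil]
      rw [pvA_inner, hr]
      simp only [List.foldl_nil, if_pos hend]
      rw [pvA_prodLoop_eq]
      simp only [one_mul]
    · have hi1 : i + 1 < (grid.length : Int) := by omega
      have hW := pvWin_cons grid j n i hn
      have hslide := pvWin_slide grid j n i hn
      have ht : (pvWin grid j n i).tail ++ [pvGet grid (i + 1) j] = pvWin grid j n (i + 1) := by
        rw [hW, List.tail_cons, hslide]
      rw [pvA_inner]
      simp only [if_neg hend]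
      rw [ht, ih (i + 1) (max m (pvA_prodLoop (pvWin grid j n i) 1)) hi1 (by omega)]
      rw [PySem.List.pyRange_one_cons hi1, List.foldl_cons]
      congr 2
      congr 1
      -- the slide step maps the state for window i to the state for window i + 1
      rw [← hslide, pvProdNZ_append_singleton, pvCntZ_append_singleton, pvA_prodLoop_eq, hW]
      simp only [pvProdNZ, pvCntZ]
      by_cases hu : pvGet grid (i + 1 - n) j = 0 <;>
        by_cases hv : pvGet grid (i + 1) j = 0 <;>
          simp [hu, hv, Int.mul_fdiv_cancel_left, PySem.Int.floordiv]

-- ===== VERDICT (by name: the statement is the Claim_ definition above) =====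
theorem find_greatest_product_in_cols_spec : Claim_equal_find_greatest_product_in_cols := by
  intro grid n _ hpre
  unfold Spec_find_greatest_product_in_cols
  unfold find_greatest_product_in_cols find_greatest_product_in_cols_alt
  simp only []
  by_cases hgt : n > (grid.length : Int)
  · rw [if_pos hgt, if_pos hgt]
  · rw [if_neg hgt, if_neg hgt]
    rcases hpre with h1 | h2 | ⟨hn, _⟩
    · exact absurd h1 hgt
    · subst h2
      have hr : PySem.List.pyRange 0 (([] : List (List Int)).length) 1 = [] := by
        rw [PySem.List.pyRange_one]; rfl
      rw [hr]
      simp only [List.foldl_nil]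
    · congr 1
      funext m j
      rw [pvWin_first grid j n (by omega)]
      rw [pv_main grid n j hn ((grid.length : Int) - n).toNat (n - 1) m (by omega) (by omega)]
      rw [pvB_init_fold grid j]
      rw [pvWin_first grid j n (by omega)]
      simp only [one_mul, zero_add]
      have h1 : n - 1 + 1 = n := by ring
      rw [h1]
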